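-- pv_equiv track=rewrite | github.com/smplisri/AdventOfCode2020 | standalone/udfs.py | lineSepGroupFormatterDict
-- ===== SOURCE A (Python) =====
-- def lineSepGroupFormatterDict(lines_list, delimiter, join_char):
--     iterator, answerset, interim_data = 1, {}, []
--     formatted_list = list(map(lambda x: x.strip() if x != delimiter else x, lines_list))
--     formatted_list.append(delimiter)
--     for item in formatted_list:
--         if item.strip() == "":
--             answerset["group" + str(iterator)] = interim_data
--             interim_data = []
--             iterator = iterator + 1
--         else:
--             interim_data.append(item)
--
--     return answerset
-- ===== SOURCE B (Python) =====
-- def lineSepGroupFormatterDict(lines_list, delimiter, join_char):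
--     formatted = [x if x == delimiter else x.strip() for x in lines_list]
--     formatted.append(delimiter)
--     # repeatedly split off the chunk before the first separator-like item
--     groups = []
--     rest = formatted
--     while True:
--         i = next((j for j, v in enumerate(rest) if v.strip() == ""), None)
--         if i is None:
--             break
--         groups.append(rest[:i])
--         rest = rest[i + 1:]
--     return {"group" + str(n + 1): g for n, g in enumerate(groups)}
-- ===== Notes on version B (the rewrite author's own statement) =====
-- stated objective: alternative
-- what changed: A's single stateful fold (counter + interim accumulator + dict mutated while scanning) is replaced by repeated split-at-first-separator producing a list of chunks, followed by a dict comprehension that numbers them.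
import Mathlib
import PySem

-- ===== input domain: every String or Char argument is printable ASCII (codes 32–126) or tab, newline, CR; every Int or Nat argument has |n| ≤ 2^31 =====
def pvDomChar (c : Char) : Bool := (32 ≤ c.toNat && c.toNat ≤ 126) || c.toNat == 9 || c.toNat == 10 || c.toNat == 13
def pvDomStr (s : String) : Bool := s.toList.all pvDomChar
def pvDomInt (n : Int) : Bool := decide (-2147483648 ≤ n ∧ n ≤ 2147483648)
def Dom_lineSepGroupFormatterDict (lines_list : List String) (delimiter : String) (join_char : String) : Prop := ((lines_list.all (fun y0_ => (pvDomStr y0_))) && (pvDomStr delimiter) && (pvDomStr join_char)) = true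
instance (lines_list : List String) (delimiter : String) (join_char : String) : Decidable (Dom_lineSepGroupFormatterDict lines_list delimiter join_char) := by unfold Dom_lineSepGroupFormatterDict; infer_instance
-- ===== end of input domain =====

-- B replaces A's single stateful fold (counter + interim list + dict mutated while scanning) by
-- repeated split-at-first-separator into a chunk list, then a numbering dict comprehension (objective: alternative).

-- ===== PORT A =====
def lineSepGroupFormatterDict (lines_list : List String) (delimiter : String) (join_char : String) : List (String × List String) :=
  -- formatted_list = list(map(lambda x: x.strip() if x != delimiter else x, lines_list)); formatted_list.append(delimiter)
  let formatted := (lines_list.map (fun x => if x ≠ delimiter then PySem.Str.strip x else x)) ++ [delimiter]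
  -- for item in formatted_list: if item.strip() == "": answerset["group"+str(iterator)] = interim_data; … else interim_data.append(item)
  let fin := formatted.foldl
    (fun (st : Int × PySem.Dict String (List String) × List String) item =>
      if PySem.Str.strip item = "" then
        (st.1 + 1, st.2.1.insert ("group" ++ PySem.Int.toStr st.1) st.2.2, [])
      else
        (st.1, st.2.1, st.2.2 ++ [item]))
    (1, PySem.Dict.empty, [])
  fin.2.1.items

-- ===== PORT B =====
-- i = next((j for j, v in enumerate(rest) if v.strip() == ""), None)
def pvFirstSep (rest : List String) : Option Int :=
  (((PySem.List.enumerate rest 0).filter (fun p => PySem.Str.strip p.2 = "")).head?).map (fun p => p.1)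

-- termination fact for pvChunks, cited in decreasing_by
theorem pvFirstSep_slice_lt (l : List String) (i : Int) (h : pvFirstSep l = some i) :
    (PySem.List.slice l (some (i + 1)) none).length < l.length := by
  unfold pvFirstSep at h
  rcases Option.map_eq_some_iff.mp h with ⟨p, hp, hi⟩
  have hmem : p ∈ (PySem.List.enumerate l 0).filter (fun p => PySem.Str.strip p.2 = "") :=
    List.mem_of_mem_head? (by simp [hp])
  have hmem' : p ∈ PySem.List.enumerate l 0 := (List.mem_filter.mp hmem).1
  rcases (PySem.List.mem_enumerate_iff _ _ _).mp hmem' with ⟨k, hk, rfl⟩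
  subst hi
  simp only [zero_add]
  have : ((k : Int) + 1) = ((k + 1 : Nat) : Int) := by push_cast; ring
  rw [this, PySem.List.slice_from_natCast]
  simp only [List.length_drop]
  omega

-- while True: i = first separator index; groups.append(rest[:i]); rest = rest[i+1:]
def pvChunks (rest : List String) : List (List String) :=
  match h : pvFirstSep rest with
  | none => []
  | some i => PySem.List.slice rest none (some i) :: pvChunks (PySem.List.slice rest (some (i + 1)) none)
termination_by rest.length
decreasing_by exact pvFirstSep_slice_lt rest i h

def lineSepGroupFormatterDict_alt (lines_list : List String) (delimiter : String) (join_char : String) : List (String × List String) :=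
  -- formatted = [x if x == delimiter else x.strip() for x in lines_list]; formatted.append(delimiter)
  let formatted := (lines_list.map (fun x => if x = delimiter then x else PySem.Str.strip x)) ++ [delimiter]
  let groups := pvChunks formatted
  -- {"group" + str(n + 1): g for n, g in enumerate(groups)}
  ((PySem.List.enumerate groups 0).foldl
      (fun (d : PySem.Dict String (List String)) p => d.insert ("group" ++ PySem.Int.toStr (p.1 + 1)) p.2)
      PySem.Dict.empty).items

-- ===== PRECONDITION & SPEC =====
def Spec_lineSepGroupFormatterDict (lines_list : List String) (delimiter : String) (join_char : String) (out : List (String × List String)) : Prop := out = lineSepGroupFormatterDict_alt lines_list delimiter join_char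
instance (lines_list : List String) (delimiter : String) (join_char : String) (out : List (String × List String)) : Decidable (Spec_lineSepGroupFormatterDict lines_list delimiter join_char out) := by unfold Spec_lineSepGroupFormatterDict; infer_instance

-- ===== CLAIM (what is proved, stated in full; the proofs are below) =====
def Claim_equal_lineSepGroupFormatterDict : Prop := ∀ (lines_list : List String) (delimiter : String) (join_char : String), Dom_lineSepGroupFormatterDict lines_list delimiter join_char → Spec_lineSepGroupFormatterDict lines_list delimiter join_char (lineSepGroupFormatterDict lines_list delimiter join_char)

-- ===== LEMMAS AND PROOFS =====

-- the list of groups A's fold emits, given the pending interim accumulator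
def pvGroupsA (l : List String) (interim : List String) : List (List String) :=
  match l with
  | [] => []
  | x :: xs => if PySem.Str.strip x = "" then interim :: pvGroupsA xs [] else pvGroupsA xs (interim ++ [x])

-- numbered insertion of a list of groups starting at counter it
def pvInsNum (d : PySem.Dict String (List String)) (it : Int) : List (List String) → PySem.Dict String (List String)
  | [] => d
  | g :: gs => pvInsNum (d.insert ("group" ++ PySem.Int.toStr it) g) (it + 1) gs

-- Nat-valued first-separator index (spec of pvFirstSep)
def pvFsN (l : List String) : Option Nat :=
  match l with
  | [] => none
  | x :: xs => if PySem.Str.strip x = "" then some 0 else (pvFsN xs).map (· + 1)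

theorem pvFirstSep_aux (l : List String) : ∀ s : Int,
    ((((PySem.List.enumerate l s).filter (fun p => PySem.Str.strip p.2 = "")).head?).map (fun p => p.1))
      = (pvFsN l).map (fun k => (k : Int) + s) := by
  induction l with
  | nil => intro s; simp [PySem.List.enumerate_nil, pvFsN]
  | cons x xs ih =>
    intro s
    rw [PySem.List.enumerate_cons]
    by_cases hx : PySem.Str.strip x = ""
    · simp [pvFsN, hx]
    · simp only [pvFsN, hx, if_false, List.filter_cons, decide_eq_true_eq]
      rw [ih (s + 1)]
      cases pvFsN xs with
      | none => simp
      | some k => simp; ring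

theorem pvFirstSep_eq (l : List String) : pvFirstSep l = (pvFsN l).map (fun k => (k : Int)) := by
  unfold pvFirstSep
  rw [pvFirstSep_aux l 0]
  cases pvFsN l <;> simp

theorem pvChunks_nil : pvChunks [] = [] := by
  have h : pvFirstSep [] = none := rfl
  rw [pvChunks, h]

-- bridge: groupsA with pending interim is chunks with interim prepended to the first chunk
theorem pvGroupsA_eq_chunks (l : List String) : ∀ interim,
    pvGroupsA l interim = (match pvChunks l with
      | [] => []
      | g :: gs => (interim ++ g) :: gs) := by
  induction l with
  | nil => intro interim; simp [pvGroupsA, pvChunks_nil]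
  | cons x xs ih =>
    intro interim
    by_cases hx : PySem.Str.strip x = ""
    · -- first separator at index 0
      have hfs : pvFirstSep (x :: xs) = some 0 := by
        rw [pvFirstSep_eq]; simp [pvFsN, hx]
      rw [pvChunks, hfs]
      simp only [pvGroupsA, hx, if_true]
      have h0 : PySem.List.slice (x :: xs) none (some (0 : Int)) = [] := by
        rw [show ((0:Int)) = ((0:Nat):Int) by norm_num, PySem.List.slice_to_natCast]; simp
      have h1 : PySem.List.slice (x :: xs) (some ((0:Int) + 1)) none = xs := by
        rw [show ((0:Int)+1) = ((1:Nat):Int) by norm_num, PySem.List.slice_from_natCast]; simp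
      rw [h0, h1]
      have hxs : pvGroupsA xs [] = pvChunks xs := by
        rw [ih []]
        rcases pvChunks xs with _ | ⟨g, gs⟩ <;> simp
      simp [hxs]
    · simp only [pvGroupsA, hx, if_false]
      rw [ih (interim ++ [x])]
      rcases hn : pvFsN xs with _ | k
      · -- no separator anywhere
        have hx2 : pvFsN (x :: xs) = none := by simp [pvFsN, hx, hn]
        have hxs : pvChunks xs = [] := by rw [pvChunks, pvFirstSep_eq, hn]; simp
        have hxxs : pvChunks (x :: xs) = [] := by rw [pvChunks, pvFirstSep_eq, hx2]; simp
        simp [hxs, hxxs]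
      · have hx2 : pvFsN (x :: xs) = some (k + 1) := by simp [pvFsN, hx, hn]
        have hxs : pvChunks xs
            = PySem.List.slice xs none (some (k : Int)) :: pvChunks (PySem.List.slice xs (some ((k : Int) + 1)) none) := by
          rw [pvChunks, pvFirstSep_eq, hn]; simp
        have hxxs : pvChunks (x :: xs)
            = PySem.List.slice (x :: xs) none (some ((k + 1 : Nat) : Int))
              :: pvChunks (PySem.List.slice (x :: xs) (some (((k + 1 : Nat) : Int) + 1)) none) := by
          rw [pvChunks, pvFirstSep_eq, hx2]; simp
        have e1 : PySem.List.slice (x :: xs) none (some ((k + 1 : Nat) : Int)) = x :: PySem.List.slice xs none (some (k : Int)) := by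
          rw [show ((k:Int)) = ((k:Nat):Int) by norm_num]
          rw [PySem.List.slice_to_natCast, PySem.List.slice_to_natCast]
          simp [List.take_succ_cons]
        have e2 : PySem.List.slice (x :: xs) (some (((k + 1 : Nat) : Int) + 1)) none = PySem.List.slice xs (some ((k : Int) + 1)) none := by
          rw [show (((k + 1 : Nat) : Int) + 1) = ((k + 2 : Nat) : Int) by push_cast; ring,
              show ((k:Int) + 1) = ((k + 1 : Nat) : Int) by push_cast; ring]
          rw [PySem.List.slice_from_natCast, PySem.List.slice_from_natCast]
          simp [List.drop_succ_cons]
        rw [hxxs, e1, e2, hxs]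
        simp

theorem pvChunks_eq_groupsA (l : List String) : pvChunks l = pvGroupsA l [] := by
  rw [pvGroupsA_eq_chunks l []]
  rcases hc : pvChunks l with _ | ⟨g, gs⟩ <;> simp

-- A's fold produces pvInsNum over pvGroupsA
theorem pvFoldA_eq (l : List String) : ∀ (it : Int) (d : PySem.Dict String (List String)) (interim : List String),
    (l.foldl
      (fun (st : Int × PySem.Dict String (List String) × List String) item =>
        if PySem.Str.strip item = "" then
          (st.1 + 1, st.2.1.insert ("group" ++ PySem.Int.toStr st.1) st.2.2, [])
        else
          (st.1, st.2.1, st.2.2 ++ [item])) (it, d, interim)).2.1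
      = pvInsNum d it (pvGroupsA l interim) := by
  induction l with
  | nil => intro it d interim; simp [pvGroupsA, pvInsNum]
  | cons x xs ih =>
    intro it d interim
    by_cases hx : PySem.Str.strip x = ""
    · simp only [List.foldl_cons, hx, if_true, pvGroupsA, pvInsNum]
      exact ih (it + 1) _ []
    · simp only [List.foldl_cons, hx, if_false, pvGroupsA]
      exact ih it d (interim ++ [x])

-- B's enumerate fold produces pvInsNum starting at s + 1
theorem pvFoldB_eq (gs : List (List String)) : ∀ (s : Int) (d : PySem.Dict String (List String)),
    ((PySem.List.enumerate gs s).foldl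
        (fun (d : PySem.Dict String (List String)) p => d.insert ("group" ++ PySem.Int.toStr (p.1 + 1)) p.2) d)
      = pvInsNum d (s + 1) gs := by
  induction gs with
  | nil => intro s d; simp [PySem.List.enumerate_nil, pvInsNum]
  | cons g gs ih =>
    intro s d
    rw [PySem.List.enumerate_cons]
    simp only [List.foldl_cons, pvInsNum]
    rw [ih (s + 1)]

-- the two formatting lambdas agree pointwise
theorem pvFmt_eq (delim x : String) :
    (if x ≠ delim then PySem.Str.strip x else x) = (if x = delim then x else PySem.Str.strip x) := by
  by_cases h : x = delim <;> simp [h]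

-- ===== VERDICT (by name: the statement is the Claim_ definition above) =====
theorem lineSepGroupFormatterDict_spec : Claim_equal_lineSepGroupFormatterDict := by
  intro lines_list delimiter join_char _
  unfold Spec_lineSepGroupFormatterDict lineSepGroupFormatterDict lineSepGroupFormatterDict_alt
  simp only [funext (pvFmt_eq delimiter)]
  rw [pvFoldA_eq, pvFoldB_eq, pvChunks_eq_groupsA]
  norm_num
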